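-- pv_equiv track=rewrite | github.com/chrisivkina/python-soundboard | system_hotkey.py | order_hotkey
-- ===== SOURCE A (Python) =====
-- def order_hotkey(hotkey):
--     if len(hotkey) > 2:
--         new_hotkey = []
--         for mod in hotkey[:-1]:
--             if 'control' == mod:
--                 new_hotkey.append(mod)
--         for mod in hotkey[:-1]:
--             if 'shift' == mod:
--                 new_hotkey.append(mod)
--         for mod in hotkey[:-1]:
--             if 'alt' == mod:
--                 new_hotkey.append(mod)
--         for mod in hotkey[:-1]:
--             if 'super' == mod:
--                 new_hotkey.append(mod)
--         new_hotkey.append(hotkey[-1])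
--         hotkey = new_hotkey
--     return hotkey
-- ===== SOURCE B (Python) =====
-- def order_hotkey(hotkey):
--     if len(hotkey) <= 2:
--         return hotkey
--     ctrl, shf, alt, sup = [], [], [], []
--     for mod in hotkey[:-1]:
--         if mod == 'control':
--             ctrl.append(mod)
--         elif mod == 'shift':
--             shf.append(mod)
--         elif mod == 'alt':
--             alt.append(mod)
--         elif mod == 'super':
--             sup.append(mod)
--     return ctrl + shf + alt + sup + [hotkey[-1]]
-- ===== Notes on version B (the rewrite author's own statement) =====
-- stated objective: alternative
-- what changed: B makes a single pass over the modifiers, dispatching each into one of four buckets, then concatenates the buckets, instead of A's four sequential full scans of hotkey[:-1].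
import Mathlib
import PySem

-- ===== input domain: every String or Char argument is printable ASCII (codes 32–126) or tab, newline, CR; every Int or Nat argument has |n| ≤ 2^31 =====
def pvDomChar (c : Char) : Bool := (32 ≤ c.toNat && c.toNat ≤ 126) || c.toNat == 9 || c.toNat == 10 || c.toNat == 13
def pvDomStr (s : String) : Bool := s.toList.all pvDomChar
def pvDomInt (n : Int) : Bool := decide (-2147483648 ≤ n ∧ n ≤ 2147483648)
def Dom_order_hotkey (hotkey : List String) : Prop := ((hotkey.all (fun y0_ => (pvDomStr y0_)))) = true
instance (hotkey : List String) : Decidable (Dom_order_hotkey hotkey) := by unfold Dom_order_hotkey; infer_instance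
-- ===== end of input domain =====

-- B replaces A's four sequential scans of hotkey[:-1] by a single pass into four buckets; alternative decomposition, same cost class.

-- ===== PORT A =====
def order_hotkey (hotkey : List String) : List String :=
  if hotkey.length > 2 then
    let pre := PySem.List.slice hotkey none (some (-1))
    let nh1 := pre.foldl (fun acc m => if "control" = m then acc ++ [m] else acc) []
    let nh2 := pre.foldl (fun acc m => if "shift" = m then acc ++ [m] else acc) nh1
    let nh3 := pre.foldl (fun acc m => if "alt" = m then acc ++ [m] else acc) nh2
    let nh4 := pre.foldl (fun acc m => if "super" = m then acc ++ [m] else acc) nh3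
    -- hotkey[-1]: in-range here since length > 2, so the default is never used
    nh4 ++ [PySem.List.pyGetD hotkey (-1) ""]
  else hotkey

-- ===== PORT B =====
def order_hotkey_alt (hotkey : List String) : List String :=
  if hotkey.length ≤ 2 then hotkey
  else
    let s := (PySem.List.slice hotkey none (some (-1))).foldl
      (fun (st : List String × List String × List String × List String) m =>
        if m = "control" then (st.1 ++ [m], st.2.1, st.2.2.1, st.2.2.2)
        else if m = "shift" then (st.1, st.2.1 ++ [m], st.2.2.1, st.2.2.2)
        else if m = "alt" then (st.1, st.2.1, st.2.2.1 ++ [m], st.2.2.2)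
        else if m = "super" then (st.1, st.2.1, st.2.2.1, st.2.2.2 ++ [m])
        else st) ([], [], [], [])
    s.1 ++ s.2.1 ++ s.2.2.1 ++ s.2.2.2 ++ [PySem.List.pyGetD hotkey (-1) ""]

-- ===== PRECONDITION & SPEC =====
def Spec_order_hotkey (hotkey : List String) (out : List String) : Prop := out = order_hotkey_alt hotkey
instance (hotkey : List String) (out : List String) : Decidable (Spec_order_hotkey hotkey out) := by unfold Spec_order_hotkey; infer_instance

-- ===== CLAIM (what is proved, stated in full; the proofs are below) =====
def Claim_equal_order_hotkey : Prop := ∀ (hotkey : List String), Dom_order_hotkey hotkey → Spec_order_hotkey hotkey (order_hotkey hotkey)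

-- ===== LEMMAS AND PROOFS =====

/-- B's single-pass fold computes the four per-modifier filters of the scanned list. -/
lemma alt_fold_eq_filters (l : List String) (c sh al su : List String) :
    l.foldl
      (fun (st : List String × List String × List String × List String) m =>
        if m = "control" then (st.1 ++ [m], st.2.1, st.2.2.1, st.2.2.2)
        else if m = "shift" then (st.1, st.2.1 ++ [m], st.2.2.1, st.2.2.2)
        else if m = "alt" then (st.1, st.2.1, st.2.2.1 ++ [m], st.2.2.2)
        else if m = "super" then (st.1, st.2.1, st.2.2.1, st.2.2.2 ++ [m])
        else st) (c, sh, al, su)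
    = (c ++ l.filter (fun m => m = "control"),
       sh ++ l.filter (fun m => m = "shift"),
       al ++ l.filter (fun m => m = "alt"),
       su ++ l.filter (fun m => m = "super")) := by
  induction l generalizing c sh al su with
  | nil => simp
  | cons m t ih =>
    by_cases h1 : m = "control"
    · simp [h1, ih, List.filter]
    · by_cases h2 : m = "shift"
      · simp [h1, h2, ih, List.filter]
      · by_cases h3 : m = "alt"
        · simp [h1, h2, h3, ih, List.filter]
        · by_cases h4 : m = "super"
          · simp [h1, h2, h3, h4, ih, List.filter]
          · simp [h1, h2, h3, h4, ih, List.filter]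

-- ===== VERDICT (by name: the statement is the Claim_ definition above) =====
theorem order_hotkey_spec : Claim_equal_order_hotkey := by
  intro hotkey _
  unfold Spec_order_hotkey order_hotkey order_hotkey_alt
  by_cases hlen : hotkey.length > 2
  · simp only [hlen, if_pos, show ¬ hotkey.length ≤ 2 by omega, if_neg, not_false_iff]
    rw [alt_fold_eq_filters]
    simp only [PySem.List.foldl_append_ite_eq_filter, List.nil_append, List.append_assoc]
    congr 1
    · apply List.filter_congr; intro x _; simp [eq_comm]
    congr 1
    · apply List.filter_congr; intro x _; simp [eq_comm]
    congr 1
    · apply List.filter_congr; intro x _; simp [eq_comm]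
    congr 1
    · apply List.filter_congr; intro x _; simp [eq_comm]
  · simp [hlen, show hotkey.length ≤ 2 by omega]
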